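-- pv_equiv track=rewrite | github.com/Venu-R/hacknocturne-2.0-RiskLens | RiskLens/RiskLens/backend/app/services/github_service.py | compute_ci_failure_streak
-- ===== SOURCE A (Python) =====
-- def compute_ci_failure_streak(runs):
--     """Count consecutive failed workflow runs from most recent."""
--     streak = 0
--     for run in runs:
--         if run["conclusion"] in ("failure", "timed_out"):
--             streak += 1
--         elif run["conclusion"] == "success":
--             break
--     return streak
-- ===== SOURCE B (Python) =====
-- def compute_ci_failure_streak(runs):
--     """Count consecutive failed workflow runs from most recent."""
--     n = 0
--     while n < len(runs) and runs[n]["conclusion"] != "success":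
--         n += 1
--     return sum(1 for run in runs[:n] if run["conclusion"] in ("failure", "timed_out"))
-- ===== Notes on version B (the rewrite author's own statement) =====
-- stated objective: alternative
-- what changed: B separates the stopping condition from the counting: it first finds the index of the first run whose conclusion is 'success' (scanning only up to it), then counts failure/timed_out conclusions in that prefix, replacing A's single three-way-branch early-exit accumulator loop with two predicate passes.
import Mathlib
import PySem

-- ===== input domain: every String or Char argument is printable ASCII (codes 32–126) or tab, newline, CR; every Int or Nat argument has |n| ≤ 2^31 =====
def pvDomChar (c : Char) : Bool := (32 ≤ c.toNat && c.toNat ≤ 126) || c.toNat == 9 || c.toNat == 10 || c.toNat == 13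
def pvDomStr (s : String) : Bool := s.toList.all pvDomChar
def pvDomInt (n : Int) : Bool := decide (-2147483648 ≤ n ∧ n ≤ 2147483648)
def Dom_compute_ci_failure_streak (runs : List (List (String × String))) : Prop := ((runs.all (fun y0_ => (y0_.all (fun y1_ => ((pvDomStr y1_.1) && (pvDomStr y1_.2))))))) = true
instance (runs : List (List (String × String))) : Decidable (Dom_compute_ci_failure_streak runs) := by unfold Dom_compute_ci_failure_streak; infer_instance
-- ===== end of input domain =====

-- B replaces A's single three-way early-exit accumulator loop by two passes: first find the
-- index of the first 'success' run, then count failure/timed_out conclusions in that prefix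
-- (objective: alternative decomposition, same cost).

-- ===== PORT A =====
-- the for-loop of A with its accumulator `streak`; run["conclusion"] is first-match
-- List.lookup with a dummy default, exact on Pre_ (where the key is present wherever read)
def pvLoopA : List (List (String × String)) → Int → Int
  | [], streak => streak
  | run :: rest, streak =>
    let c := (run.lookup "conclusion").getD ""
    if c = "failure" ∨ c = "timed_out" then pvLoopA rest (streak + 1)
    else if c = "success" then streak
    else pvLoopA rest streak

def compute_ci_failure_streak (runs : List (List (String × String))) : Int :=
  pvLoopA runs 0

-- ===== PORT B =====
-- Source B's while-loop computing n, the index of the first run with conclusion "success"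
def pvStopB : List (List (String × String)) → Nat
  | [] => 0
  | run :: rest =>
    if (run.lookup "conclusion").getD "" = "success" then 0 else pvStopB rest + 1

-- runs[:n] for 0 ≤ n ≤ len(runs) is List.take n; the generator-sum of 1s is countP
def compute_ci_failure_streak_alt (runs : List (List (String × String))) : Int :=
  ((runs.take (pvStopB runs)).countP
    (fun run =>
      let c := (run.lookup "conclusion").getD ""
      c == "failure" || c == "timed_out") : Int)

-- ===== PRECONDITION & SPEC =====
-- Pre_: A (and B identically) raises KeyError iff some run scanned before reaching the first
-- "success" conclusion lacks the key "conclusion"; Pre_ holds exactly where Python A returns.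
def pvPreOkB : List (List (String × String)) → Bool
  | [] => true
  | run :: rest =>
    match run.lookup "conclusion" with
    | none => false
    | some c => if c = "success" then true else pvPreOkB rest

def Pre_compute_ci_failure_streak (runs : List (List (String × String))) : Prop :=
  pvPreOkB runs = true
instance (runs : List (List (String × String))) : Decidable (Pre_compute_ci_failure_streak runs) := by
  unfold Pre_compute_ci_failure_streak; infer_instance

def pvWitness_compute_ci_failure_streak : (List (List (String × String))) :=
  [[("conclusion", "failure")], [("conclusion", "timed_out")], [("conclusion", "neutral")],
   [("conclusion", "success")], [("status", "queued")]]

def Spec_compute_ci_failure_streak (runs : List (List (String × String))) (out : Int) : Prop := out = compute_ci_failure_streak_alt runs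
instance (runs : List (List (String × String))) (out : Int) : Decidable (Spec_compute_ci_failure_streak runs out) := by unfold Spec_compute_ci_failure_streak; infer_instance

-- ===== CLAIM (what is proved, stated in full; the proofs are below) =====
def Claim_equal_compute_ci_failure_streak : Prop := ∀ (runs : List (List (String × String))), Dom_compute_ci_failure_streak runs → Pre_compute_ci_failure_streak runs → Spec_compute_ci_failure_streak runs (compute_ci_failure_streak runs)

-- ===== LEMMAS AND PROOFS =====

-- loop invariant: A's accumulator run equals streak plus B's prefix count (holds on ALL inputs)
theorem pvLoopA_eq (runs : List (List (String × String))) (streak : Int) :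
    pvLoopA runs streak =
      streak + ((runs.take (pvStopB runs)).countP
        (fun run =>
          let c := (run.lookup "conclusion").getD ""
          c == "failure" || c == "timed_out") : Int) := by
  induction runs generalizing streak with
  | nil => simp [pvLoopA, pvStopB]
  | cons run rest ih =>
    simp only [pvLoopA, pvStopB]
    by_cases hf : (run.lookup "conclusion").getD "" = "failure" ∨
        (run.lookup "conclusion").getD "" = "timed_out"
    · have hns : ¬ (run.lookup "conclusion").getD "" = "success" := by
        rcases hf with h | h <;> simp [h]
      simp only [if_pos hf, if_neg hns, ih]
      have hq : (fun run =>
          let c := (run.lookup "conclusion").getD ""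
          c == "failure" || c == "timed_out") run = true := by
        rcases hf with h | h <;> simp [h]
      simp [List.take_succ_cons, hq]
      ring
    · simp only [if_neg hf]
      by_cases hs : (run.lookup "conclusion").getD "" = "success"
      · simp [if_pos hs]
      · have hq : (fun run =>
            let c := (run.lookup "conclusion").getD ""
            c == "failure" || c == "timed_out") run = false := by
          push Not at hf
          simp [hf.1, hf.2]
        simp [if_neg hs, ih, List.take_succ_cons, hq]

-- ===== VERDICT (by name: the statement is the Claim_ definition above) =====
theorem compute_ci_failure_streak_spec : Claim_equal_compute_ci_failure_streak := by
  intro runs _ _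
  unfold Spec_compute_ci_failure_streak compute_ci_failure_streak compute_ci_failure_streak_alt
  simpa using pvLoopA_eq runs 0
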